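-- pv_equiv track=rewrite | github.com/mamane19/interview-prep-dsa | python/sprint.py | getMostVisitedMarker
-- ===== SOURCE A (Python) =====
-- def getMostVisitedMarker(n, sprints):
--      visited = [0] * (n + 1)
--      for i in range(len(sprints) - 1):
--           if sprints[i] < sprints[i + 1]:
--                visited[sprints[i]] += 1
--                visited[sprints[i + 1]] += 1
--           else:
--                visited[sprints[i + 1]] += 1
--                visited[sprints[i]] += 1
--      return visited.index(max(visited))
-- ===== SOURCE B (Python) =====
-- def getMostVisitedMarker(n, sprints):
--     visited = [0] * (n + 1)
--     for s in sprints: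
--         visited[s] += 2
--     if sprints:
--         visited[sprints[0]] -= 1
--         visited[sprints[-1]] -= 1
--     return visited.index(max(visited))
-- ===== Notes on version B (the rewrite author's own statement) =====
-- stated objective: simpler
-- what changed: A increments two counters per adjacent pair in an index loop over range(len-1); B makes a single per-element pass adding 2 to each marker's counter and then subtracts 1 at the first and last marker (each interior marker is an endpoint of two pairs, the ends of one). Pre_ requires every marker to be a valid index into [0]*(n+1); on a single-element sprints list with an out-of-range marker A returns without ever indexing it while B's per-element pass raises IndexError, so such inputs are excluded.
-- outside the precondition, e.g. on getMostVisitedMarker(0, [3]): A returns 0, B raises IndexError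
import Mathlib
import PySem

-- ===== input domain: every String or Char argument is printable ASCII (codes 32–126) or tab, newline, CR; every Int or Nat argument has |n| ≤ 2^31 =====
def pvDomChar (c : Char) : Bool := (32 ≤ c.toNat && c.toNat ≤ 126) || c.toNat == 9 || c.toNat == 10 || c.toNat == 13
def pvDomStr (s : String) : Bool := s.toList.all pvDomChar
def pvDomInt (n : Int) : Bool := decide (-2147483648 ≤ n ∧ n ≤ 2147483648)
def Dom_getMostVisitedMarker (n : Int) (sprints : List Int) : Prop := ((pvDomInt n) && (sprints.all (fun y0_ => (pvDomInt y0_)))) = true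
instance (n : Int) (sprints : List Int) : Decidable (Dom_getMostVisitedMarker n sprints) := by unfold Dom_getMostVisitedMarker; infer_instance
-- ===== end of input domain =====

-- B replaces A's pairwise loop (two counter increments per adjacent pair) by a single
-- per-element pass adding 2, followed by a −1 correction at the two endpoint markers
-- (objective: simpler — one pass over the values instead of an index loop over pairs).

-- visited[i] += k  (Python augmented assignment on a list; index may be negative — Python wraps)
def pyBump (v : List Int) (i k : Int) : List Int :=
  PySem.List.pySetD v i (PySem.List.pyGetD v i 0 + k)

-- visited.index(max(visited)) — first index of the first maximum (visited nonempty under Pre_)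
def pyArgmax (v : List Int) : Int :=
  match PySem.List.max? v (fun x => x) with
  | some mx => (((PySem.List.index? v mx).getD 0 : Nat) : Int)
  | none => 0

-- ===== PORT A =====
def getMostVisitedMarker (n : Int) (sprints : List Int) : Int :=
  let visited0 := List.replicate (n + 1).toNat (0 : Int)
  let visited := (PySem.List.pyRange 0 ((sprints.length : Int) - 1) 1).foldl
    (fun v i =>
      if PySem.List.pyGetD sprints i 0 < PySem.List.pyGetD sprints (i + 1) 0 then
        pyBump (pyBump v (PySem.List.pyGetD sprints i 0) 1) (PySem.List.pyGetD sprints (i + 1) 0) 1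
      else
        pyBump (pyBump v (PySem.List.pyGetD sprints (i + 1) 0) 1) (PySem.List.pyGetD sprints i 0) 1)
    visited0
  pyArgmax visited

-- ===== PORT B =====
def getMostVisitedMarker_alt (n : Int) (sprints : List Int) : Int :=
  let visited0 := List.replicate (n + 1).toNat (0 : Int)
  let visited1 := sprints.foldl (fun v s => pyBump v s 2) visited0
  let visited2 :=
    if sprints.isEmpty then visited1
    else pyBump (pyBump visited1 (PySem.List.pyGetD sprints 0 0) (-1))
                (PySem.List.pyGetD sprints (-1) 0) (-1)
  pyArgmax visited2

-- ===== PRECONDITION & SPEC =====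
-- Pre_: n ≥ 0 (else A's max([]) raises ValueError) and every sprint marker a valid Python index
-- into [0]*(n+1), i.e. -(n+1) ≤ s ≤ n; negative markers (Python's wraparound) are INSIDE Pre_.
-- Excluded although A returns there: a single-element sprints list whose marker is out of range —
-- A's pair loop never indexes it, while B's per-element pass would raise IndexError.
def Pre_getMostVisitedMarker (n : Int) (sprints : List Int) : Prop :=
  0 ≤ n ∧ ∀ s ∈ sprints, -(n + 1) ≤ s ∧ s ≤ n
instance (n : Int) (sprints : List Int) : Decidable (Pre_getMostVisitedMarker n sprints) := by
  unfold Pre_getMostVisitedMarker; infer_instance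

def pvWitness_getMostVisitedMarker : Int × List Int := (3, [0, 2, -1, 2])

def Spec_getMostVisitedMarker (n : Int) (sprints : List Int) (out : Int) : Prop := out = getMostVisitedMarker_alt n sprints
instance (n : Int) (sprints : List Int) (out : Int) : Decidable (Spec_getMostVisitedMarker n sprints out) := by unfold Spec_getMostVisitedMarker; infer_instance

-- ===== CLAIM (what is proved, stated in full; the proofs are below) =====
def Claim_equal_getMostVisitedMarker : Prop := ∀ (n : Int) (sprints : List Int), Dom_getMostVisitedMarker n sprints → Pre_getMostVisitedMarker n sprints → Spec_getMostVisitedMarker n sprints (getMostVisitedMarker n sprints)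

-- ===== LEMMAS AND PROOFS =====

-- proof-side normal form of a bump: a Nat index (Python's wrap already resolved) and List.set
def nb (v : List Int) (j : Nat) (k : Int) : List Int := v.set j (v.getD j 0 + k)

-- the Nat index Python's possibly-negative index i resolves to in a list of length L
def pyNIdx (L : Nat) (s : Int) : Nat := (if s < 0 then s + L else s).toNat

theorem length_nb (v : List Int) (j : Nat) (k : Int) : (nb v j k).length = v.length := by
  simp [nb]

theorem nb_zero (v : List Int) (j : Nat) : nb v j 0 = v := by
  unfold nb
  by_cases h : j < v.length
  · rw [add_zero, List.getD_eq_getElem v 0 h, List.set_getElem_self]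
  · exact List.set_eq_of_length_le (by omega)

theorem nb_add (v : List Int) (j : Nat) (a b : Int) : nb (nb v j a) j b = nb v j (a + b) := by
  unfold nb
  by_cases h : j < v.length
  · rw [List.set_set]
    simp [List.getD, h]
    ring_nf
  · rw [List.set_eq_of_length_le (l := v) (by omega)]
    rw [List.set_eq_of_length_le (by omega), List.set_eq_of_length_le (by omega)]

theorem nb_comm (v : List Int) (i j : Nat) (a b : Int) :
    nb (nb v i a) j b = nb (nb v j b) i a := by
  by_cases hij : i = j
  · subst hij; rw [nb_add, nb_add, add_comm]
  · unfold nb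
    rw [List.getD, List.getD, List.getD, List.getD,
        List.getElem?_set_ne (by omega), List.getElem?_set_ne (by omega)]
    exact List.set_comm _ _ hij

theorem foldl_nb_comm (l : List Int) (g : Int → Nat) (c : Int) :
    ∀ (v : List Int) (j : Nat) (k : Int),
      l.foldl (fun w s => nb w (g s) c) (nb v j k)
        = nb (l.foldl (fun w s => nb w (g s) c) v) j k := by
  induction l with
  | nil => intro v j k; rfl
  | cons x t ih =>
      intro v j k
      simp only [List.foldl_cons]
      rw [nb_comm, ih]

theorem length_foldl_nb (l : List Int) (g : Int → Nat) (c : Int) :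
    ∀ (v : List Int), (l.foldl (fun w s => nb w (g s) c) v).length = v.length := by
  induction l with
  | nil => intro v; rfl
  | cons x t ih => intro v; simp only [List.foldl_cons]; rw [ih, length_nb]

theorem bump_eq_nb (v : List Int) (s k : Int)
    (h1 : -(v.length : Int) ≤ s) (h2 : s < (v.length : Int)) :
    pyBump v s k = nb v (pyNIdx v.length s) k := by
  unfold pyBump nb pyNIdx
  unfold PySem.List.pySetD PySem.List.pySet? PySem.List.pyGetD PySem.List.pyGet? PySem.List.pyIdx?
  by_cases hs : 0 ≤ s
  · simp only [if_pos hs, if_pos h2, if_neg (by omega : ¬ s < 0), Option.map_some, Option.getD_some,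
      Option.bind_some, List.getD]
  · have hneg : s < 0 := by omega
    simp only [if_neg hs, if_pos h1, if_pos hneg, Option.map_some, Option.getD_some,
      Option.bind_some, List.getD]
    have h3 : v.length - (-s).toNat = (s + ↑v.length).toNat := by omega
    rw [h3]

-- A's pairwise body on (a, b): both branches bump both endpoints, in nb form
theorem pair_body_eq (L : Nat) (v : List Int) (a b : Int)
    (hv : v.length = L)
    (ha : -(L : Int) ≤ a ∧ a < L) (hb : -(L : Int) ≤ b ∧ b < L) :
    (if a < b then pyBump (pyBump v a 1) b 1 else pyBump (pyBump v b 1) a 1)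
      = nb (nb v (pyNIdx L a) 1) (pyNIdx L b) 1 := by
  subst hv
  split_ifs with hab
  · rw [bump_eq_nb v a 1 (by omega) (by omega),
        bump_eq_nb _ b 1 (by rw [length_nb]; omega) (by rw [length_nb]; omega), length_nb]
  · rw [bump_eq_nb v b 1 (by omega) (by omega),
        bump_eq_nb _ a 1 (by rw [length_nb]; omega) (by rw [length_nb]; omega), length_nb]
    exact nb_comm v (pyNIdx v.length b) (pyNIdx v.length a) 1 1

-- the zip fold of A's body, in nb form
theorem zipfold_eq (L : Nat) (q : List (Int × Int))
    (hq : ∀ p ∈ q, (-(L : Int) ≤ p.1 ∧ p.1 < L) ∧ (-(L : Int) ≤ p.2 ∧ p.2 < L)) :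
    ∀ v : List Int, v.length = L →
      q.foldl (fun v p => if p.1 < p.2 then pyBump (pyBump v p.1 1) p.2 1
                          else pyBump (pyBump v p.2 1) p.1 1) v
        = q.foldl (fun v p => nb (nb v (pyNIdx L p.1) 1) (pyNIdx L p.2) 1) v := by
  induction q with
  | nil => intro v _; rfl
  | cons p t ih =>
      intro v hv
      simp only [List.foldl_cons]
      rw [pair_body_eq L v p.1 p.2 hv (hq p (by simp)).1 (hq p (by simp)).2]
      exact ih (fun p hp => hq p (by simp [hp])) _ (by rw [length_nb, length_nb, hv])

-- A's index loop over range(len(sprints)-1) is the fold over adjacent pairs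
theorem rangefold_eq_zipfold (sprints : List Int) (v0 : List Int) :
    (PySem.List.pyRange 0 ((sprints.length : Int) - 1) 1).foldl
      (fun v i =>
        if PySem.List.pyGetD sprints i 0 < PySem.List.pyGetD sprints (i + 1) 0 then
          pyBump (pyBump v (PySem.List.pyGetD sprints i 0) 1) (PySem.List.pyGetD sprints (i + 1) 0) 1
        else
          pyBump (pyBump v (PySem.List.pyGetD sprints (i + 1) 0) 1) (PySem.List.pyGetD sprints i 0) 1)
      v0
    = (sprints.zip sprints.tail).foldl
        (fun v p => if p.1 < p.2 then pyBump (pyBump v p.1 1) p.2 1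
                    else pyBump (pyBump v p.2 1) p.1 1) v0 := by
  cases sprints with
  | nil =>
      rw [PySem.List.pyRange_one_eq_nil (by simp)]
      rfl
  | cons x r =>
      have hlen : ((x :: r).length : Int) - 1 = (((x :: r).zip r).length : Int) := by
        simp [List.length_zip]
      rw [show (x :: r).tail = r from rfl, hlen,
          ← PySem.List.foldl_pyRange_zero_pyGetD' ((x :: r).zip r) ((0 : Int), (0 : Int))
            (fun v p => if p.1 < p.2 then pyBump (pyBump v p.1 1) p.2 1
                        else pyBump (pyBump v p.2 1) p.1 1) v0]
      apply PySem.List.foldl_congr_mem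
      intro acc i hi
      obtain ⟨h0, h1⟩ := PySem.List.mem_pyRange_one.mp hi
      have hzl : ((x :: r).zip r).length = r.length := by simp [List.length_zip]
      have hiN : i.toNat < r.length := by rw [hzl] at h1; omega
      have h1' : (i + 1).toNat = i.toNat + 1 := by omega
      rw [PySem.List.pyGetD_eq_getElem _ _ h0 h1, List.getElem_zip,
          PySem.List.pyGetD_eq_getElem (x :: r) 0 h0 (by simp; omega),
          PySem.List.pyGetD_eq_getElem (x :: r) 0 (by omega) (by simp; omega)]
      simp only [h1', List.getElem_cons_succ]

-- the heart: pairwise +1/+1 over adjacent pairs = +2 per element, −1 at head and last (pure nb algebra)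
theorem pairs_eq_double_minus_ends (m : Int → Nat) :
    ∀ (r : List Int) (x : Int) (v : List Int),
      ((x :: r).zip r).foldl (fun w p => nb (nb w (m p.1) 1) (m p.2) 1) v
        = nb (nb ((x :: r).foldl (fun w s => nb w (m s) 2) v) (m x) (-1))
             (m ((x :: r).getLast (List.cons_ne_nil x r))) (-1) := by
  intro r
  induction r with
  | nil =>
      intro x v
      simp only [List.zip_nil_right, List.foldl_nil, List.foldl_cons, List.getLast_singleton]
      rw [nb_add, nb_add, show (2 + (-1 + -1) : Int) = 0 from by norm_num, nb_zero]
  | cons y r' ih =>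
      intro x v
      rw [show (List.zip (x :: y :: r') (y :: r')) = (x, y) :: (List.zip (y :: r') r') from rfl]
      simp only [List.foldl_cons]
      rw [ih y (nb (nb v (m x) 1) (m y) 1)]
      rw [List.getLast_cons (List.cons_ne_nil y r')]
      have hL : List.foldl (fun w s => nb w (m s) 2) (nb (nb v (m x) 1) (m y) 1) (y :: r')
          = nb (nb (List.foldl (fun w s => nb w (m s) 2) v (y :: r')) (m x) 1) (m y) 1 := by
        rw [foldl_nb_comm (y :: r') m 2 (nb v (m x) 1) (m y) 1,
            foldl_nb_comm (y :: r') m 2 v (m x) 1]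
      have hR : List.foldl (fun w s => nb w (m s) 2) (nb (nb v (m x) 2) (m y) 2) r'
          = nb (nb (List.foldl (fun w s => nb w (m s) 2) v r') (m x) 2) (m y) 2 := by
        rw [foldl_nb_comm r' m 2 (nb v (m x) 2) (m y) 2, foldl_nb_comm r' m 2 v (m x) 2]
      have hA : List.foldl (fun w s => nb w (m s) 2) v (y :: r')
          = nb (List.foldl (fun w s => nb w (m s) 2) v r') (m y) 2 := by
        rw [show List.foldl (fun w s => nb w (m s) 2) v (y :: r')
              = List.foldl (fun w s => nb w (m s) 2) (nb v (m y) 2) r' from rfl,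
            foldl_nb_comm r' m 2 v (m y) 2]
      rw [hL, hA, hR]
      rw [nb_add, show ((1 : Int) + -1) = 0 from by norm_num, nb_zero]
      rw [nb_comm (List.foldl (fun w s => nb w (m s) 2) v r') (m x) (m y) 2 2]
      rw [nb_add, show ((2 : Int) + -1) = 1 from by norm_num]

-- B's per-element fold, in nb form
theorem fold2_eq (L : Nat) (l : List Int)
    (hl : ∀ s ∈ l, -(L : Int) ≤ s ∧ s < L) :
    ∀ v : List Int, v.length = L →
      l.foldl (fun v s => pyBump v s 2) v = l.foldl (fun v s => nb v (pyNIdx L s) 2) v := by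
  induction l with
  | nil => intro v _; rfl
  | cons s t ih =>
      intro v hv
      simp only [List.foldl_cons]
      rw [show pyBump v s 2 = nb v (pyNIdx L s) 2 from by
            subst hv
            exact bump_eq_nb v s 2 (hl s (by simp)).1 (hl s (by simp)).2]
      exact ih (fun a ha => hl a (by simp [ha])) _ (by rw [length_nb, hv])

-- ===== VERDICT (by name: the statement is the Claim_ definition above) =====
theorem getMostVisitedMarker_spec : Claim_equal_getMostVisitedMarker := by
  intro n sprints _ hpre
  obtain ⟨hn, hall⟩ := hpre
  have hL : (((n + 1).toNat : Nat) : Int) = n + 1 := Int.toNat_of_nonneg (by omega)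
  simp only [Spec_getMostVisitedMarker, getMostVisitedMarker, getMostVisitedMarker_alt]
  cases sprints with
  | nil =>
      rw [show PySem.List.pyRange 0 ((([] : List Int).length : Int) - 1) 1 = [] from
            PySem.List.pyRange_one_eq_nil (by simp)]
      rfl
  | cons x r =>
      have hv0 : (List.replicate (n + 1).toNat (0 : Int)).length = (n + 1).toNat :=
        List.length_replicate
      have hin : ∀ s ∈ x :: r, -(((n + 1).toNat : Nat) : Int) ≤ s ∧ s < (((n + 1).toNat : Nat) : Int) := by
        intro s hs
        have := hall s hs
        rw [hL]
        omega
      rw [rangefold_eq_zipfold (x :: r) (List.replicate (n + 1).toNat 0)]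
      rw [zipfold_eq (n + 1).toNat ((x :: r).zip (x :: r).tail)
            (fun p hp => ⟨hin p.1 (List.of_mem_zip (by exact hp)).1,
                          hin p.2 (List.mem_cons_of_mem x (List.of_mem_zip (by exact hp)).2)⟩)
            (List.replicate (n + 1).toNat 0) hv0]
      rw [show (x :: r).tail = r from rfl]
      rw [pairs_eq_double_minus_ends (pyNIdx (n + 1).toNat) r x (List.replicate (n + 1).toNat 0)]
      rw [if_neg (by simp : ¬ ((x :: r).isEmpty = true))]
      rw [fold2_eq (n + 1).toNat (x :: r) hin (List.replicate (n + 1).toNat 0) hv0]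
      have hlen1 : (List.foldl (fun v s => nb v (pyNIdx (n + 1).toNat s) 2)
            (List.replicate (n + 1).toNat (0 : Int)) (x :: r)).length = (n + 1).toNat := by
        rw [length_foldl_nb (x :: r) (pyNIdx (n + 1).toNat) 2, hv0]
      rw [PySem.List.pyGetD_zero_cons x r 0,
          PySem.List.pyGetD_neg_one (x :: r) 0 (List.cons_ne_nil x r)]
      rw [bump_eq_nb _ x (-1)
            (by rw [hlen1]; exact (hin x (List.mem_cons_self)).1)
            (by rw [hlen1]; exact (hin x (List.mem_cons_self)).2)]
      rw [hlen1]
      rw [bump_eq_nb _ ((x :: r).getLast (List.cons_ne_nil x r)) (-1)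
            (by rw [length_nb, hlen1]; exact (hin _ (List.getLast_mem (List.cons_ne_nil x r))).1)
            (by rw [length_nb, hlen1]; exact (hin _ (List.getLast_mem (List.cons_ne_nil x r))).2)]
      rw [length_nb, hlen1]
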